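-- pv_equiv track=rewrite | github.com/muzzi85/clipmodeldeployedtoazure | room_classification.py | classify_room_from_objects
-- ===== SOURCE A (Python) =====
-- kitchen_objects = [
-- "a photo of a kitchen cabinets",
-- ]
--
-- bedroom_objects = [
--     "a photo of a bed",
--     "a photo of a single bed",
--     "a photo of a double bed",
--     "a photo of a duvet",
--     "a photo of a pillow",
--     "a photo of a wardrobe",
-- ]
--
-- bathroom_objects = [
--     "a photo of a bath",
--     "a photo of a bathroom basin",
--     "a photo of a shower head",
--     "a photo of a toilet seat",
--     "a photo of a single ended bath",
-- ]
--
-- livingroom_objects = [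
--     "a photo of a sofa",
--     "a photo of a television",
--     "a photo of a dinning table and chairs",
--     "a photo of a heater radiator",
--     "a photo of a living room",
-- ]
--
-- outdoor_objects = [
--     "a photo of a garden",
--     "a photo of a tree",
--     "a photo of a car",
-- ]
--
-- def classify_room_from_objects(objects_dict):
--
--
--     """
--     Decide the room type based ONLY on detected objects from the CLIP detector.
--     objects_dict = { "object label": confidence, ... }
--     """
--
--     # Normalize keys (lowercase, strip)
--     detected = objects_dict#{k.lower().strip() for k in objects_dict.keys()}
--
--     # ---------------------------
--     # ROOM RULES
--     # ---------------------------
--     # ---------------------------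
--
--     def has_any(category_objects):
--         return any(obj.lower() in detected for obj in category_objects)
--
--     # Helper for rule matching
--
--     # ---------------------------
--     # DECISION LOGIC
--     # ---------------------------
--     if has_any(kitchen_objects):
--         return "kitchen"
--
--     if has_any(bedroom_objects):
--         return "bedroom"
--
--     if has_any(bathroom_objects):
--         return "bathroom"
--
--     if has_any(livingroom_objects):
--         return "living room"
--
--     if has_any(outdoor_objects):
--         return "outdoor"
--
--     return "unknown"
--
--     """
--     Infer final room type based purely on detected objects.
--     labels_dict is: { "object_label": confidence, ... }
--     """
--     # Normalize keys for matching
--     detected_objects = [obj.lower() for obj in labels_dict.keys()]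
--
--     # Count hits per room
--     scores = {room: 0 for room in ROOM_RULES}
--
--     for room, rule in ROOM_RULES.items():
--         for keyword in rule["keywords"]:
--             for obj in detected_objects:
--                 if keyword in obj:
--                     scores[room] += 1
--
--     # Pick the room with highest score
--     best_room = max(scores, key=scores.get)
--
--     # Ensure minimum object evidence
--     if scores[best_room] >= ROOM_RULES[best_room]["min_hits"]:
--         return best_room
--     else:
--         return "unknown"
-- ===== SOURCE B (Python) =====
-- kitchen_objects = [
-- "a photo of a kitchen cabinets",
-- ]
--
-- bedroom_objects = [
--     "a photo of a bed",
--     "a photo of a single bed",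
--     "a photo of a double bed",
--     "a photo of a duvet",
--     "a photo of a pillow",
--     "a photo of a wardrobe",
-- ]
--
-- bathroom_objects = [
--     "a photo of a bath",
--     "a photo of a bathroom basin",
--     "a photo of a shower head",
--     "a photo of a toilet seat",
--     "a photo of a single ended bath",
-- ]
--
-- livingroom_objects = [
--     "a photo of a sofa",
--     "a photo of a television",
--     "a photo of a dinning table and chairs",
--     "a photo of a heater radiator",
--     "a photo of a living room",
-- ]
--
-- outdoor_objects = [
--     "a photo of a garden",
--     "a photo of a tree",
--     "a photo of a car",
-- ]
--
-- _ROOMS = ["kitchen", "bedroom", "bathroom", "living room", "outdoor"]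
--
-- _LOOKUP = {}
-- for _i, _cat in enumerate([kitchen_objects, bedroom_objects, bathroom_objects,
--                            livingroom_objects, outdoor_objects]):
--     for _label in _cat:
--         _LOOKUP[_label.lower()] = _i
--
--
-- def classify_room_from_objects(objects_dict):
--     best = None
--     for key in objects_dict:
--         i = _LOOKUP.get(key)
--         if i is not None and (best is None or i < best):
--             best = i
--     return _ROOMS[best] if best is not None else "unknown"
-- ===== Notes on version B (the rewrite author's own statement) =====
-- stated objective: idiomatic
-- what changed: Replaced five sequential any()-scans over category lists (each scanning the dict) by one precomputed label-to-priority table and a single pass over the dict keys tracking the minimum priority index.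
import Mathlib
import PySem

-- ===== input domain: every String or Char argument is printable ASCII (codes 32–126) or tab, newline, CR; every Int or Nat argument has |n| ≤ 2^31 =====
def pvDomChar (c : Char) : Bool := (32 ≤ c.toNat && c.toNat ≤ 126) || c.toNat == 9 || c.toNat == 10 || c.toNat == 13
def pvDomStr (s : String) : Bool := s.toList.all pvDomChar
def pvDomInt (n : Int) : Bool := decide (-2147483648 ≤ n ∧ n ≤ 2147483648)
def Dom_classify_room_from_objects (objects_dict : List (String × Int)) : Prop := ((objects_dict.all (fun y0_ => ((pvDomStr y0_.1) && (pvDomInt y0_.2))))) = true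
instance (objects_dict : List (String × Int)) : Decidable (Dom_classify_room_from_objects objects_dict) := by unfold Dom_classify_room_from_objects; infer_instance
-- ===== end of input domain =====

-- B replaces A's five sequential any()-scans-with-early-return by one precomputed
-- label→priority table and a single pass over the keys tracking the minimum priority
-- index (objective: idiomatic; same result, proved equal below).

-- ===== PORT A =====
def kitchen_objects : List String := ["a photo of a kitchen cabinets"]

def bedroom_objects : List String :=
  ["a photo of a bed", "a photo of a single bed", "a photo of a double bed",
   "a photo of a duvet", "a photo of a pillow", "a photo of a wardrobe"]

def bathroom_objects : List String :=
  ["a photo of a bath", "a photo of a bathroom basin", "a photo of a shower head",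
   "a photo of a toilet seat", "a photo of a single ended bath"]

def livingroom_objects : List String :=
  ["a photo of a sofa", "a photo of a television", "a photo of a dinning table and chairs",
   "a photo of a heater radiator", "a photo of a living room"]

def outdoor_objects : List String :=
  ["a photo of a garden", "a photo of a tree", "a photo of a car"]

-- `obj.lower() in detected` : membership test among the dict's keys
def hasAnyA (detected : List (String × Int)) (category_objects : List String) : Bool :=
  category_objects.any (fun obj => detected.any (fun p => p.1 == PySem.Str.lower obj))

def classify_room_from_objects (objects_dict : List (String × Int)) : String :=
  let detected := objects_dict
  if hasAnyA detected kitchen_objects then "kitchen"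
  else if hasAnyA detected bedroom_objects then "bedroom"
  else if hasAnyA detected bathroom_objects then "bathroom"
  else if hasAnyA detected livingroom_objects then "living room"
  else if hasAnyA detected outdoor_objects then "outdoor"
  else "unknown"

-- ===== PORT B =====
def roomsB : List String := ["kitchen", "bedroom", "bathroom", "living room", "outdoor"]

-- the module-level loop building _LOOKUP from the enumerated category lists
def lookupB : PySem.Dict String Int :=
  (PySem.List.enumerate [kitchen_objects, bedroom_objects, bathroom_objects,
                         livingroom_objects, outdoor_objects]).foldl
    (fun d ic => ic.2.foldl (fun d lab => d.insert (PySem.Str.lower lab) ic.1) d)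
    PySem.Dict.empty

def classify_room_from_objects_alt (objects_dict : List (String × Int)) : String :=
  let best :=
    objects_dict.foldl
      (fun best p =>
        match lookupB.get? p.1 with
        | some i =>
          match best with
          | none => some i
          | some b => if i < b then some i else some b
        | none => best)
      (none : Option Int)
  match best with
  | some b => (PySem.List.pyGet? roomsB b).getD "unknown"   -- _ROOMS[best]; 0 ≤ best < 5 always, so pyGet? is some
  | none => "unknown"

-- ===== PRECONDITION & SPEC =====
def Spec_classify_room_from_objects (objects_dict : List (String × Int)) (out : String) : Prop := out = classify_room_from_objects_alt objects_dict
instance (objects_dict : List (String × Int)) (out : String) : Decidable (Spec_classify_room_from_objects objects_dict out) := by unfold Spec_classify_room_from_objects; infer_instance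

-- ===== CLAIM (what is proved, stated in full; the proofs are below) =====
def Claim_equal_classify_room_from_objects : Prop := ∀ (objects_dict : List (String × Int)), Dom_classify_room_from_objects objects_dict → Spec_classify_room_from_objects objects_dict (classify_room_from_objects objects_dict)

-- ===== LEMMAS AND PROOFS =====

-- B's folding step
def stepB (best : Option Int) (p : String × Int) : Option Int :=
  match lookupB.get? p.1 with
  | some i =>
    match best with
    | none => some i
    | some b => if i < b then some i else some b
  | none => best

-- option-min used to characterize B's fold
def omin : Option Int → Option Int → Option Int
  | none, y => y
  | some a, none => some a
  | some a, some b => some (min a b)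

theorem stepB_eq (best : Option Int) (p : String × Int) :
    stepB best p = omin best (lookupB.get? p.1) := by
  cases h : lookupB.get? p.1 <;> cases best <;>
    simp only [stepB, omin, h] <;> try rfl
  split <;> simp [min_def] <;> omega

theorem omin_assoc (x y z : Option Int) : omin (omin x y) z = omin x (omin y z) := by
  cases x <;> cases y <;> cases z <;> simp [omin, min_assoc]

theorem foldl_stepB (d : List (String × Int)) (b : Option Int) :
    d.foldl stepB b = omin b (d.foldl stepB none) := by
  induction d generalizing b with
  | nil => cases b <;> simp [omin]
  | cons p d ih =>
    simp only [List.foldl_cons, stepB_eq]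
    rw [ih, ih (omin none (lookupB.get? p.1)), ← omin_assoc, ← omin_assoc]
    congr 1
    cases b <;> cases h : lookupB.get? p.1 <;> simp [omin]

-- membership of key k in category i, as A sees it
def memCat (k : String) (cat : List String) : Bool :=
  cat.any (fun obj => k == PySem.Str.lower obj)

-- first-true index among five flags (the shape of both programs' decisions)
def idx5 (b0 b1 b2 b3 b4 : Bool) : Option Int :=
  if b0 then some 0 else if b1 then some 1 else if b2 then some 2
  else if b3 then some 3 else if b4 then some 4 else none

theorem omin_idx5 (a0 a1 a2 a3 a4 b0 b1 b2 b3 b4 : Bool) :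
    omin (idx5 a0 a1 a2 a3 a4) (idx5 b0 b1 b2 b3 b4) =
      idx5 (a0 || b0) (a1 || b1) (a2 || b2) (a3 || b3) (a4 || b4) := by
  cases a0 <;> cases a1 <;> cases a2 <;> cases a3 <;> cases a4 <;>
    cases b0 <;> cases b1 <;> cases b2 <;> cases b3 <;> cases b4 <;> rfl

-- the table lookup, characterized by category membership
set_option maxHeartbeats 1600000 in
set_option maxRecDepth 8000 in
theorem lookupB_char (k : String) :
    lookupB.get? k =
      idx5 (memCat k kitchen_objects) (memCat k bedroom_objects)
        (memCat k bathroom_objects) (memCat k livingroom_objects)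
        (memCat k outdoor_objects) := by
  have hl : lookupB = PySem.Dict.mk
      [("a photo of a kitchen cabinets", 0),
       ("a photo of a bed", 1), ("a photo of a single bed", 1), ("a photo of a double bed", 1),
       ("a photo of a duvet", 1), ("a photo of a pillow", 1), ("a photo of a wardrobe", 1),
       ("a photo of a bath", 2), ("a photo of a bathroom basin", 2), ("a photo of a shower head", 2),
       ("a photo of a toilet seat", 2), ("a photo of a single ended bath", 2),
       ("a photo of a sofa", 3), ("a photo of a television", 3),
       ("a photo of a dinning table and chairs", 3), ("a photo of a heater radiator", 3),
       ("a photo of a living room", 3),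
       ("a photo of a garden", 4), ("a photo of a tree", 4), ("a photo of a car", 4)] := by
    decide
  by_cases h0 : k = "a photo of a kitchen cabinets"
  · subst h0; decide
  by_cases h1 : k = "a photo of a bed"
  · subst h1; decide
  by_cases h2 : k = "a photo of a single bed"
  · subst h2; decide
  by_cases h3 : k = "a photo of a double bed"
  · subst h3; decide
  by_cases h4 : k = "a photo of a duvet"
  · subst h4; decide
  by_cases h5 : k = "a photo of a pillow"
  · subst h5; decide
  by_cases h6 : k = "a photo of a wardrobe"
  · subst h6; decide
  by_cases h7 : k = "a photo of a bath"
  · subst h7; decide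
  by_cases h8 : k = "a photo of a bathroom basin"
  · subst h8; decide
  by_cases h9 : k = "a photo of a shower head"
  · subst h9; decide
  by_cases h10 : k = "a photo of a toilet seat"
  · subst h10; decide
  by_cases h11 : k = "a photo of a single ended bath"
  · subst h11; decide
  by_cases h12 : k = "a photo of a sofa"
  · subst h12; decide
  by_cases h13 : k = "a photo of a television"
  · subst h13; decide
  by_cases h14 : k = "a photo of a dinning table and chairs"
  · subst h14; decide
  by_cases h15 : k = "a photo of a heater radiator"
  · subst h15; decide
  by_cases h16 : k = "a photo of a living room"
  · subst h16; decide
  by_cases h17 : k = "a photo of a garden"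
  · subst h17; decide
  by_cases h18 : k = "a photo of a tree"
  · subst h18; decide
  by_cases h19 : k = "a photo of a car"
  · subst h19; decide
  rw [hl]
  have L0 : PySem.Str.lower "a photo of a kitchen cabinets" = "a photo of a kitchen cabinets" := by decide
  have L1 : PySem.Str.lower "a photo of a bed" = "a photo of a bed" := by decide
  have L2 : PySem.Str.lower "a photo of a single bed" = "a photo of a single bed" := by decide
  have L3 : PySem.Str.lower "a photo of a double bed" = "a photo of a double bed" := by decide
  have L4 : PySem.Str.lower "a photo of a duvet" = "a photo of a duvet" := by decide
  have L5 : PySem.Str.lower "a photo of a pillow" = "a photo of a pillow" := by decide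
  have L6 : PySem.Str.lower "a photo of a wardrobe" = "a photo of a wardrobe" := by decide
  have L7 : PySem.Str.lower "a photo of a bath" = "a photo of a bath" := by decide
  have L8 : PySem.Str.lower "a photo of a bathroom basin" = "a photo of a bathroom basin" := by decide
  have L9 : PySem.Str.lower "a photo of a shower head" = "a photo of a shower head" := by decide
  have L10 : PySem.Str.lower "a photo of a toilet seat" = "a photo of a toilet seat" := by decide
  have L11 : PySem.Str.lower "a photo of a single ended bath" = "a photo of a single ended bath" := by decide
  have L12 : PySem.Str.lower "a photo of a sofa" = "a photo of a sofa" := by decide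
  have L13 : PySem.Str.lower "a photo of a television" = "a photo of a television" := by decide
  have L14 : PySem.Str.lower "a photo of a dinning table and chairs" = "a photo of a dinning table and chairs" := by decide
  have L15 : PySem.Str.lower "a photo of a heater radiator" = "a photo of a heater radiator" := by decide
  have L16 : PySem.Str.lower "a photo of a living room" = "a photo of a living room" := by decide
  have L17 : PySem.Str.lower "a photo of a garden" = "a photo of a garden" := by decide
  have L18 : PySem.Str.lower "a photo of a tree" = "a photo of a tree" := by decide
  have L19 : PySem.Str.lower "a photo of a car" = "a photo of a car" := by decide
  simp only [PySem.Dict.get?_mk_cons, idx5, memCat, kitchen_objects, bedroom_objects,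
    bathroom_objects, livingroom_objects, outdoor_objects, List.any_cons, List.any_nil,
    L0, L1, L2, L3, L4, L5, L6, L7, L8, L9, L10, L11, L12, L13, L14, L15, L16, L17, L18, L19, Bool.or_false]
  have f : ∀ a b : String, a ≠ b → (a == b) = false := fun a b h => beq_eq_false_iff_ne.mpr h
  simp only [f _ _ (Ne.symm h0), f _ _ h0, f _ _ (Ne.symm h1), f _ _ h1, f _ _ (Ne.symm h2), f _ _ h2, f _ _ (Ne.symm h3), f _ _ h3, f _ _ (Ne.symm h4), f _ _ h4, f _ _ (Ne.symm h5), f _ _ h5, f _ _ (Ne.symm h6), f _ _ h6, f _ _ (Ne.symm h7), f _ _ h7, f _ _ (Ne.symm h8), f _ _ h8, f _ _ (Ne.symm h9), f _ _ h9, f _ _ (Ne.symm h10), f _ _ h10, f _ _ (Ne.symm h11), f _ _ h11, f _ _ (Ne.symm h12), f _ _ h12, f _ _ (Ne.symm h13), f _ _ h13, f _ _ (Ne.symm h14), f _ _ h14, f _ _ (Ne.symm h15), f _ _ h15, f _ _ (Ne.symm h16), f _ _ h16, f _ _ (Ne.symm h17), f _ _ h17, f _ _ (Ne.symm h18), f _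 _ h18, f _ _ (Ne.symm h19), f _ _ h19, Bool.or_false, Bool.false_or]
  simp [PySem.Dict.get?]

-- A's scan over a category = any key of the dict belongs to the category
theorem hasAnyA_eq (d : List (String × Int)) (cat : List String) :
    hasAnyA d cat = d.any (fun p => memCat p.1 cat) := by
  simp only [hasAnyA, memCat]
  rw [Bool.eq_iff_iff]
  simp only [List.any_eq_true]
  tauto

-- B's fold computes the first-true index of the five membership flags
theorem foldl_stepB_char (d : List (String × Int)) :
    d.foldl stepB none =
      idx5 (d.any (fun p => memCat p.1 kitchen_objects))
        (d.any (fun p => memCat p.1 bedroom_objects))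
        (d.any (fun p => memCat p.1 bathroom_objects))
        (d.any (fun p => memCat p.1 livingroom_objects))
        (d.any (fun p => memCat p.1 outdoor_objects)) := by
  induction d with
  | nil => rfl
  | cons p d ih =>
    have h1 : (p :: d).foldl stepB none = omin (stepB none p) (d.foldl stepB none) := by
      rw [List.foldl_cons, foldl_stepB]
    rw [h1, ih]
    have h2 : stepB none p = lookupB.get? p.1 := by
      simp only [stepB]; cases lookupB.get? p.1 <;> rfl
    rw [h2, lookupB_char, omin_idx5]
    simp only [List.any_cons]

theorem alt_eq (d : List (String × Int)) :
    classify_room_from_objects_alt d =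
      match d.foldl stepB none with
      | some b => (PySem.List.pyGet? roomsB b).getD "unknown"
      | none => "unknown" := rfl

-- ===== VERDICT (by name: the statement is the Claim_ definition above) =====
theorem classify_room_from_objects_spec : Claim_equal_classify_room_from_objects := by
  intro d _
  unfold Spec_classify_room_from_objects
  rw [alt_eq, foldl_stepB_char]
  simp only [classify_room_from_objects, hasAnyA_eq]
  cases d.any (fun p => memCat p.1 kitchen_objects) <;>
  cases d.any (fun p => memCat p.1 bedroom_objects) <;>
  cases d.any (fun p => memCat p.1 bathroom_objects) <;>
  cases d.any (fun p => memCat p.1 livingroom_objects) <;>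
  cases d.any (fun p => memCat p.1 outdoor_objects) <;> rfl
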